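-- pv_equiv track=rewrite | github.com/raxmonovshaxzod2004-design/studyhelperv3 | main.py | parse_test_file
-- ===== SOURCE A (Python) =====
-- def parse_test_file(content):
--     tests = []
--     lines = content.split('\n')
--     current_q = ""
--     full_text = ""
--     for line in lines:
--         if "ANSWER:" in line:
--             correct = line.split("ANSWER:")[1].strip()
--             first_line = full_text.strip().split('\n')[0] if full_text.strip() else "Savol"
--             q_title = first_line[:50]
--             tests.append({"q": q_title, "full": full_text.strip(), "ans": correct})
--             current_q = ""
--             full_text = ""
--         else:
--             if not current_q and line.strip():
--                 current_q = line
--             full_text += line + "\n"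
--     return tests
-- ===== SOURCE B (Python) =====
-- def parse_test_file(content):
--     # Phase 1: group lines into (block_lines, answer) pairs; an unterminated
--     # trailing buffer is dropped.  Phase 2: map each group to its dict.
--     groups = []
--     buf = []
--     for line in content.split('\n'):
--         if "ANSWER:" in line:
--             groups.append((buf, line.split("ANSWER:")[1].strip()))
--             buf = []
--         else:
--             buf.append(line)
--     result = []
--     for block, ans in groups:
--         full = '\n'.join(block).strip()
--         title = (full.split('\n')[0] if full else "Savol")[:50]
--         result.append({"q": title, "full": full, "ans": ans})
--     return result
-- ===== Notes on version B (the rewrite author's own statement) =====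
-- stated objective: alternative
-- what changed: Replaces A's single loop that mutates string accumulators (repeated string concatenation into full_text and in-loop dict building, plus the dead current_q variable) with a two-phase group-then-map: first partition the lines into (block, answer) groups, then build each dict by joining its block in a separate pass.
import Mathlib
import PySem

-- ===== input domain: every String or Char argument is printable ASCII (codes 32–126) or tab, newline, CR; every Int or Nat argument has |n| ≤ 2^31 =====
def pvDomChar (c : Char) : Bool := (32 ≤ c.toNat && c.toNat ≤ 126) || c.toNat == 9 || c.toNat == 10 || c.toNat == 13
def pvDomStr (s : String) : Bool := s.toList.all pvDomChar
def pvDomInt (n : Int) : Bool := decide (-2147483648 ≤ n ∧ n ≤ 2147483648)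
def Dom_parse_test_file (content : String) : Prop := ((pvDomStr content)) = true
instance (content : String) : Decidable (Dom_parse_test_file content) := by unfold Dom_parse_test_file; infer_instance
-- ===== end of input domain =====

-- B replaces A's one-pass string-accumulator loop by a two-phase group-then-map decomposition (same cost, clearer structure).


-- ===== PORT A =====
-- loop body of A's single for-loop; state = (tests, current_q, full_text)
def pvStepA (st : List (List (String × String)) × String × String) (line : String) :
    List (List (String × String)) × String × String :=
  if PySem.Str.isIn "ANSWER:" line then
    let correct := PySem.Str.strip ((PySem.List.pyGet? ((PySem.Str.split? line "ANSWER:").getD []) 1).getD "")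
    let first_line := if PySem.Str.strip st.2.2 ≠ "" then
        (PySem.List.pyGet? ((PySem.Str.split? (PySem.Str.strip st.2.2) "\n").getD []) 0).getD ""
      else "Savol"
    let q_title := PySem.Str.slice first_line none (some 50)
    (st.1 ++ [[("q", q_title), ("full", PySem.Str.strip st.2.2), ("ans", correct)]], "", "")
  else
    (st.1, (if st.2.1 = "" ∧ PySem.Str.strip line ≠ "" then line else st.2.1), st.2.2 ++ line ++ "\n")

def parse_test_file (content : String) : List (List (String × String)) :=
  ((((PySem.Str.split? content "\n").getD []).foldl pvStepA ([], "", ""))).1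

-- ===== PORT B =====
-- line.split("ANSWER:")[1].strip()
def pvAnsOf (line : String) : String :=
  PySem.Str.strip ((PySem.List.pyGet? ((PySem.Str.split? line "ANSWER:").getD []) 1).getD "")

-- phase-1 loop body; state = (groups, buf)
def pvStepB (st : List (List String × String) × List String) (line : String) :
    List (List String × String) × List String :=
  if PySem.Str.isIn "ANSWER:" line then (st.1 ++ [(st.2, pvAnsOf line)], [])
  else (st.1, st.2 ++ [line])

-- phase-2 body: one group -> one dict
def pvEntryOf (g : List String × String) : List (String × String) :=
  let full := PySem.Str.strip (PySem.Str.join "\n" g.1)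
  let title := PySem.Str.slice
      (if full ≠ "" then (PySem.List.pyGet? ((PySem.Str.split? full "\n").getD []) 0).getD "" else "Savol")
      none (some 50)
  [("q", title), ("full", full), ("ans", g.2)]

def parse_test_file_alt (content : String) : List (List (String × String)) :=
  ((((PySem.Str.split? content "\n").getD []).foldl pvStepB ([], [])).1).map pvEntryOf

-- ===== PRECONDITION & SPEC =====
def Spec_parse_test_file (content : String) (out : List (List (String × String))) : Prop := out = parse_test_file_alt content
instance (content : String) (out : List (List (String × String))) : Decidable (Spec_parse_test_file content out) := by unfold Spec_parse_test_file; infer_instance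

-- ===== CLAIM (what is proved, stated in full; the proofs are below) =====
def Claim_equal_parse_test_file : Prop := ∀ (content : String), Dom_parse_test_file content → Spec_parse_test_file content (parse_test_file content)

-- ===== LEMMAS AND PROOFS =====

-- recursive characterisation of B's grouping phase
def pvGrec : List String → List String → List (List String × String)
  | [], _ => []
  | l :: ls, buf =>
      if PySem.Str.isIn "ANSWER:" l then (buf, pvAnsOf l) :: pvGrec ls []
      else pvGrec ls (buf ++ [l])

theorem pvGrec_cons (l : String) (ls buf : List String) :
    pvGrec (l :: ls) buf =
      if PySem.Str.isIn "ANSWER:" l then (buf, pvAnsOf l) :: pvGrec ls []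
      else pvGrec ls (buf ++ [l]) := rfl

-- the characters A's full_text holds after accumulating the lines of buf
def pvCatC : List (List Char) → List Char
  | [] => []
  | b :: bs => b ++ '\n' :: pvCatC bs

theorem pvCatC_snoc (bs : List (List Char)) (l : List Char) :
    pvCatC (bs ++ [l]) = pvCatC bs ++ l ++ ['\n'] := by
  induction bs with
  | nil => simp [pvCatC]
  | cons b bs ih => simp [pvCatC, ih]

theorem pv_rstrip_nl (t : List Char) :
    PySem.Chars.rstrip (t ++ ['\n']) = PySem.Chars.rstrip t := by
  simp [PySem.Chars.rstrip, PySem.Chars.isspace]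

theorem pv_strip_nl (t : List Char) :
    PySem.Chars.strip (t ++ ['\n']) = PySem.Chars.strip t := by
  simp only [PySem.Chars.strip, PySem.Chars.lstrip, List.dropWhile_append]
  split
  · rename_i h
    have h1 : List.dropWhile PySem.Chars.isspace t = [] := List.isEmpty_iff.mp h
    simp [h1, PySem.Chars.isspace, List.dropWhile]
  · exact pv_rstrip_nl _

theorem pv_join_snoc_nil (bs : List (List Char)) :
    PySem.Chars.join ['\n'] (bs ++ [[]]) = pvCatC bs := by
  induction bs with
  | nil => simp [PySem.Chars.join_singleton, pvCatC]
  | cons b bs ih =>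
    cases bs with
    | nil => simp [PySem.Chars.join_cons_cons, PySem.Chars.join_singleton, pvCatC]
    | cons x xs =>
      have := ih
      simp only [List.cons_append] at this ⊢
      rw [PySem.Chars.join_cons_cons, this]
      simp [pvCatC]

theorem pv_strip_catC (bs : List (List Char)) :
    PySem.Chars.strip (pvCatC bs) = PySem.Chars.strip (PySem.Chars.join ['\n'] bs) := by
  cases bs with
  | nil => simp [pvCatC]
  | cons b rest =>
    rw [← pv_join_snoc_nil]
    have : PySem.Chars.join ['\n'] ((b :: rest) ++ [[]])
         = PySem.Chars.join ['\n'] (b :: rest) ++ ['\n'] := by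
      induction rest generalizing b with
      | nil => simp [PySem.Chars.join_cons_cons, PySem.Chars.join_singleton]
      | cons x xs ih =>
        simp only [List.cons_append] at ih ⊢
        rw [PySem.Chars.join_cons_cons, ih x, PySem.Chars.join_cons_cons]
        simp
    rw [this, pv_strip_nl]

-- the String-level bridge: strip of A's accumulator = strip of '\n'.join(buf)
theorem pv_strip_eq (ft : String) (buf : List String)
    (h : ft.toList = pvCatC (buf.map String.toList)) :
    PySem.Str.strip ft = PySem.Str.strip (PySem.Str.join "\n" buf) := by
  apply String.ext
  rw [PySem.Str.toList_strip, PySem.Str.toList_strip, PySem.Str.toList_join, h]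
  exact pv_strip_catC _

-- step equations for the two loop bodies
theorem pvStepB_pos (st : List (List String × String) × List String) (l : String)
    (hl : PySem.Str.isIn "ANSWER:" l = true) :
    pvStepB st l = (st.1 ++ [(st.2, pvAnsOf l)], []) := by
  unfold pvStepB; rw [if_pos hl]

theorem pvStepB_neg (st : List (List String × String) × List String) (l : String)
    (hl : ¬ PySem.Str.isIn "ANSWER:" l = true) :
    pvStepB st l = (st.1, st.2 ++ [l]) := by
  unfold pvStepB; rw [if_neg hl]

theorem pvStepA_pos (st : List (List (String × String)) × String × String) (l : String)
    (hl : PySem.Str.isIn "ANSWER:" l = true) :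
    pvStepA st l =
      (st.1 ++ [[("q", PySem.Str.slice
            (if PySem.Str.strip st.2.2 ≠ "" then
              (PySem.List.pyGet? ((PySem.Str.split? (PySem.Str.strip st.2.2) "\n").getD []) 0).getD ""
             else "Savol") none (some 50)),
          ("full", PySem.Str.strip st.2.2), ("ans", pvAnsOf l)]], "", "") := by
  unfold pvStepA pvAnsOf; rw [if_pos hl]

theorem pvStepA_neg (st : List (List (String × String)) × String × String) (l : String)
    (hl : ¬ PySem.Str.isIn "ANSWER:" l = true) :
    pvStepA st l =
      (st.1, (if st.2.1 = "" ∧ PySem.Str.strip l ≠ "" then l else st.2.1), st.2.2 ++ l ++ "\n") := by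
  unfold pvStepA; rw [if_neg hl]

-- B's foldl phase-1 computes pvGrec
theorem pv_foldB (lines : List String) (gs : List (List String × String)) (buf : List String) :
    (lines.foldl pvStepB (gs, buf)).1 = gs ++ pvGrec lines buf := by
  induction lines generalizing gs buf with
  | nil => simp [pvGrec]
  | cons l ls ih =>
    rw [List.foldl_cons, pvGrec_cons]
    by_cases hl : PySem.Str.isIn "ANSWER:" l = true
    · rw [if_pos hl, pvStepB_pos _ _ hl, ih]
      simp
    · rw [if_neg hl, pvStepB_neg _ _ hl, ih]

-- A's foldl, run from any state whose full_text holds exactly the lines of buf,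
-- appends the dicts of B's groups
theorem pv_foldA (lines : List String) (tests : List (List (String × String)))
    (cq ft : String) (buf : List String)
    (h : ft.toList = pvCatC (buf.map String.toList)) :
    (lines.foldl pvStepA (tests, cq, ft)).1 = tests ++ (pvGrec lines buf).map pvEntryOf := by
  induction lines generalizing tests cq ft buf with
  | nil => simp [pvGrec]
  | cons l ls ih =>
    rw [List.foldl_cons, pvGrec_cons]
    by_cases hl : PySem.Str.isIn "ANSWER:" l = true
    · rw [if_pos hl, pvStepA_pos _ _ hl, ih _ _ _ [] (by simp [pvCatC])]
      have hstrip := pv_strip_eq ft buf h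
      simp only [List.map_cons, pvEntryOf, ← hstrip]
      simp only [List.append_assoc, List.singleton_append]
    · rw [if_neg hl, pvStepA_neg _ _ hl, ih _ _ _ (buf ++ [l]) (by
        simp only [List.map_append, List.map_cons, List.map_nil, pvCatC_snoc,
          String.toList_append, h]
        simp)]

-- ===== VERDICT (by name: the statement is the Claim_ definition above) =====
theorem parse_test_file_spec : Claim_equal_parse_test_file := by
  intro content _
  unfold Spec_parse_test_file parse_test_file parse_test_file_alt
  rw [pv_foldA _ [] "" "" [] (by simp [pvCatC]), pv_foldB]
  simp
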